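-- pv_equiv track=rewrite | github.com/consomme67/Develop | ipro_onvif/car_speed_measure.py | is_rtsp_interleaved
-- ===== SOURCE A (Python) =====
-- def is_rtsp_interleaved(data):
--     """RTSP Interleavedフレームかどうかを判定する"""
--     # RTSPインターリーブドフレームは$ (0x24)で始まる
--     while data and data[0] != 0x24:
--         data = data[1:]
--
--     if len(data) < 4:  # $ + channel + length (2 bytes)
--         return False
--
--     if data[0] == 0x24:  # $
--         return True
--
--     return False
-- ===== SOURCE B (Python) =====
-- def is_rtsp_interleaved(data):
--     """RTSP Interleavedフレームかどうかを判定する"""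
--     # A frame needs a 0x24 with at least 3 more bytes after it, i.e. a
--     # 0x24 somewhere in the first len(data)-3 elements.
--     limit = len(data) - 3
--     if limit <= 0:
--         return False
--     return any(b == 0x24 for b in data[:limit])
-- ===== Notes on version B (the rewrite author's own statement) =====
-- stated objective: faster
-- what changed: Replaces A's strip-to-first-0x24 loop (which re-slices the list with data[1:] at every step, quadratic) plus remaining-length check by a single bounded existence scan: a 0x24 anywhere in the first len(data)-3 elements.
import Mathlib
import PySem

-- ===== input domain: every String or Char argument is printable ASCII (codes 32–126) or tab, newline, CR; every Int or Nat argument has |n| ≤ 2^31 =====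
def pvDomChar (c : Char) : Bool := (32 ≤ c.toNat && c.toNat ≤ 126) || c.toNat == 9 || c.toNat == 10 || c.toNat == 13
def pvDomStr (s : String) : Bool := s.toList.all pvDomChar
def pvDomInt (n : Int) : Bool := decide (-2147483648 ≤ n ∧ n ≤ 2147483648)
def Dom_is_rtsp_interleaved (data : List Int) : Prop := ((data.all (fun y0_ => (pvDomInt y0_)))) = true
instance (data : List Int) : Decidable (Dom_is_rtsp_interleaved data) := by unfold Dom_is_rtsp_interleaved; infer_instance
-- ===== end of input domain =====

-- B replaces A's strip-to-first-0x24 loop + remaining-length check by a single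
-- bounded existence scan over the first len-3 elements (simpler decomposition).


-- ===== PORT A =====
-- the 'while data and data[0] != 0x24: data = data[1:]' loop
def is_rtsp_interleaved_loop (data : List Int) : List Int :=
  match data with
  | [] => []
  | h :: t => if h ≠ 36 then is_rtsp_interleaved_loop t else h :: t

def is_rtsp_interleaved (data : List Int) : Bool :=
  let d := is_rtsp_interleaved_loop data
  if d.length < 4 then false
  else if PySem.List.pyGet? d 0 == some 36 then true
  else false

-- ===== PORT B =====
def is_rtsp_interleaved_alt (data : List Int) : Bool :=
  let limit : Int := (data.length : Int) - 3
  if limit ≤ 0 then false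
  else (PySem.List.slice data none (some limit)).any (fun b => b == 36)

-- ===== PRECONDITION & SPEC =====
def Spec_is_rtsp_interleaved (data : List Int) (out : Bool) : Prop := out = is_rtsp_interleaved_alt data
instance (data : List Int) (out : Bool) : Decidable (Spec_is_rtsp_interleaved data out) := by unfold Spec_is_rtsp_interleaved; infer_instance

-- ===== CLAIM (what is proved, stated in full; the proofs are below) =====
def Claim_equal_is_rtsp_interleaved : Prop := ∀ (data : List Int), Dom_is_rtsp_interleaved data → Spec_is_rtsp_interleaved data (is_rtsp_interleaved data)

-- ===== LEMMAS AND PROOFS =====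

lemma alt_eq_take (data : List Int) :
    is_rtsp_interleaved_alt data = (data.take (data.length - 3)).any (fun b => b == 36) := by
  unfold is_rtsp_interleaved_alt
  by_cases h : (data.length : Int) - 3 ≤ 0
  · have h0 : data.length - 3 = 0 := by omega
    simp [h, h0]
  · have hc : (data.length : Int) - 3 = ((data.length - 3 : Nat) : Int) := by omega
    rw [if_neg h, hc, PySem.List.slice_to_natCast]

lemma a_eq_take (data : List Int) :
    is_rtsp_interleaved data = (data.take (data.length - 3)).any (fun b => b == 36) := by
  induction data with
  | nil => simp [is_rtsp_interleaved, is_rtsp_interleaved_loop]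
  | cons h t ih =>
    by_cases hh : h = 36
    · subst hh
      have hloop : is_rtsp_interleaved_loop (36 :: t) = 36 :: t := by
        simp [is_rtsp_interleaved_loop]
      by_cases hl : t.length ≤ 2
      · have h0 : (36 :: t : List Int).length - 3 = 0 := by simp; omega
        rw [h0]
        simp only [is_rtsp_interleaved, hloop]
        rw [if_pos (by simp; omega)]
        simp
      · have hlen : ¬ ((36 :: t : List Int).length < 4) := by simp; omega
        obtain ⟨k, hk⟩ : ∃ k, (36 :: t : List Int).length - 3 = k + 1 :=
          ⟨t.length - 3, by simp; omega⟩
        rw [hk, List.take_succ_cons]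
        simp only [is_rtsp_interleaved, hloop]
        rw [if_neg hlen]
        have hget : PySem.List.pyGet? (36 :: t : List Int) 0 = some 36 := by
          simp [PySem.List.pyGet?, PySem.List.pyIdx?]
        rw [hget]
        simp
    · have hloop : is_rtsp_interleaved_loop (h :: t) = is_rtsp_interleaved_loop t := by
        simp [is_rtsp_interleaved_loop, hh]
      have hA : is_rtsp_interleaved (h :: t) = is_rtsp_interleaved t := by
        simp only [is_rtsp_interleaved, hloop]
      rw [hA, ih]
      by_cases hl : t.length ≤ 2
      · have h0 : (h :: t : List Int).length - 3 = 0 := by simp; omega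
        have h1 : t.length - 3 = 0 := by omega
        rw [h0, h1]
        simp
      · obtain ⟨k, hk1, hk2⟩ : ∃ k, (h :: t : List Int).length - 3 = k + 1 ∧ t.length - 3 = k :=
          ⟨t.length - 3, by simp; omega, rfl⟩
        rw [hk1, List.take_succ_cons, List.any_cons, hk2]
        simp [hh]

-- ===== VERDICT (by name: the statement is the Claim_ definition above) =====
theorem is_rtsp_interleaved_spec : Claim_equal_is_rtsp_interleaved := by
  intro data _
  unfold Spec_is_rtsp_interleaved
  rw [a_eq_take, alt_eq_take]
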